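-- pv_equiv track=rewrite | github.com/RomanRetsen/code_clash | a_dp2_lab8_2.py | attack_xor2
-- ===== SOURCE A (Python) =====
-- def product_score_for_byte(pos, bt, strm, k_size):
--     cntr = 0
--     for i in range(pos, len(strm), k_size):
--         xor_byte = bt ^ strm[i]
--         if (xor_byte >= 65 and xor_byte <= 90) \
--                 or (xor_byte >= 95 and xor_byte <= 122) \
--                 or (xor_byte) == 32:
--             cntr += 1
--     return cntr
--
-- def attack_xor2(stream1, k_size):
--     cracked_key = []
--     for pos in range(k_size):
--         the_temp_l = []
--         for b in range(256):
--             the_temp_l.append((b, product_score_for_byte(pos, b, stream1, k_size)))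
--         max_value = max(the_temp_l, key=lambda x:x[1])
--         cracked_key.append(max_value[0])
--     return cracked_key
-- ===== SOURCE B (Python) =====
-- # B: one pass builds a per-position value-frequency dict; each candidate byte is then
-- # scored from the distinct values (256 * distinct lookups) instead of rescanning the
-- # whole stream 256 times as A does; positions past the end of the stream have no data,
-- # so their score table is all zeros and the first maximum is byte 0 directly.
--
-- GOOD = frozenset([32] + list(range(65, 91)) + list(range(95, 123)))
--
-- def attack_xor2(stream1, k_size):
--     n = len(stream1)
--     key = []
--     for pos in range(k_size):
--         if pos >= n:
--             key.append(0)  # no data at this position: every byte scores 0, first max is 0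
--             continue
--         cnt = {}
--         for i in range(pos, n, k_size):
--             v = stream1[i]
--             cnt[v] = cnt.get(v, 0) + 1
--         best_b, best_s = 0, -1
--         for b in range(256):
--             s = 0
--             for v in cnt:
--                 if (b ^ v) in GOOD:
--                     s += cnt[v]
--             if s > best_s:
--                 best_b, best_s = b, s
--         key.append(best_b)
--     return key
-- ===== Notes on version B (the rewrite author's own statement) =====
-- stated objective: faster
-- what changed: Instead of rescanning the whole stream for each of the 256 candidate key bytes, B builds one value-frequency dict per key position in a single pass, scores each candidate byte by iterating only the distinct values seen at that position (set-membership test on the XOR), keeps the first strict maximum, and emits byte 0 directly for positions past the end of the stream.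
import Mathlib
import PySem

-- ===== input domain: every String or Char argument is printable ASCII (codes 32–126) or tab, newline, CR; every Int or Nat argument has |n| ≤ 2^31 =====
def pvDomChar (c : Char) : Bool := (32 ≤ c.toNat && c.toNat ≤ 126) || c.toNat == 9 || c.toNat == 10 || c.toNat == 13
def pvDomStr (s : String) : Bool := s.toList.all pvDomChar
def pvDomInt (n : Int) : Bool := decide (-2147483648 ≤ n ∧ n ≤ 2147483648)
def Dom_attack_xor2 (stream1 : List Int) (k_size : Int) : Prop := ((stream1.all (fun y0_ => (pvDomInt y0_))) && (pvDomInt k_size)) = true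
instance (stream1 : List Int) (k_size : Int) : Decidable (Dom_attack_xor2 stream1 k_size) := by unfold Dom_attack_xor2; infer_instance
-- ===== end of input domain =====

-- B builds one value-frequency dict per key position and scores each candidate byte from
-- the distinct values seen there, instead of rescanning the stream 256 times (objective: faster).

-- ===== PORT A =====
def product_score_for_byte (pos : Int) (bt : Int) (strm : List Int) (k_size : Int) : Int :=
  (PySem.List.pyRange pos (strm.length : Int) k_size).foldl
    (fun cntr i =>
      -- i is always a valid index here, so pyGetD is exact (Python never raises)
      let xor_byte := PySem.Int.bxor bt (PySem.List.pyGetD strm i 0)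
      if (65 ≤ xor_byte ∧ xor_byte ≤ 90) ∨ (95 ≤ xor_byte ∧ xor_byte ≤ 122) ∨ xor_byte = 32 then
        cntr + 1
      else cntr)
    0

def attack_xor2 (stream1 : List Int) (k_size : Int) : List Int :=
  (PySem.List.pyRange 0 k_size).foldl
    (fun cracked_key pos =>
      let the_temp_l := (PySem.List.pyRange 0 256).foldl
        (fun acc b => acc ++ [(b, product_score_for_byte pos b stream1 k_size)]) []
      match PySem.List.max? the_temp_l (fun x => x.2) with
      | some max_value => cracked_key ++ [max_value.1]
      | none => cracked_key)   -- unreachable: the_temp_l always has 256 elements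
    []

-- ===== PORT B =====
-- GOOD = frozenset([32] + list(range(65, 91)) + list(range(95, 123)))
def pvGood : PySem.Set Int :=
  PySem.Set.ofList ([32] ++ PySem.List.pyRange 65 91 ++ PySem.List.pyRange 95 123)

def attack_xor2_alt (stream1 : List Int) (k_size : Int) : List Int :=
  (PySem.List.pyRange 0 k_size).foldl
    (fun key pos =>
      if (stream1.length : Int) ≤ pos then
        -- no data at this position: every byte scores 0, first max is byte 0
        key ++ [0]
      else
        let cnt : PySem.Dict Int Int :=
          (PySem.List.pyRange pos (stream1.length : Int) k_size).foldl
            (fun d i => d.modify (PySem.List.pyGetD stream1 i 0) 0 (· + 1))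
            PySem.Dict.empty
        let best := (PySem.List.pyRange 0 256).foldl
          (fun st b =>
            let s : Int := cnt.keys.foldl
              (fun s v =>
                -- cnt[v] is exact as getD: v is a key of cnt
                if PySem.Int.bxor b v ∈ pvGood then s + cnt.getD v 0 else s)
              0
            if st.2 < s then (b, s) else st)
          ((0 : Int), (-1 : Int))
        key ++ [best.1])
    []

-- ===== PRECONDITION & SPEC =====
def Spec_attack_xor2 (stream1 : List Int) (k_size : Int) (out : List Int) : Prop := out = attack_xor2_alt stream1 k_size
instance (stream1 : List Int) (k_size : Int) (out : List Int) : Decidable (Spec_attack_xor2 stream1 k_size out) := by unfold Spec_attack_xor2; infer_instance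

-- ===== CLAIM (what is proved, stated in full; the proofs are below) =====
def Claim_equal_attack_xor2 : Prop := ∀ (stream1 : List Int) (k_size : Int), Dom_attack_xor2 stream1 k_size → Spec_attack_xor2 stream1 k_size (attack_xor2 stream1 k_size)

-- ===== LEMMAS AND PROOFS =====

-- A's printability test is exactly membership of the xored byte in pvGood
theorem pv_mem_good (u : Int) :
    u ∈ pvGood ↔ ((65 ≤ u ∧ u ≤ 90) ∨ (95 ≤ u ∧ u ≤ 122) ∨ u = 32) := by
  unfold pvGood
  rw [PySem.Set.mem_ofList]
  simp [PySem.List.mem_pyRange_one]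
  omega

-- summing the indicator of one occurrence over a nodup list containing it gives 1
theorem pv_sum_ite2 (p : Int → Bool) (x : Int) (S : List Int) (hS : S.Nodup) (hx : x ∈ S) :
    (S.map (fun v => if p v then (if (x == v) = true then (1 : Int) else 0) else 0)).sum
      = (if p x then (1 : Int) else 0) := by
  induction S with
  | nil => cases hx
  | cons g S ihS =>
    have hg : g ∉ S := (List.nodup_cons.mp hS).1
    have hS' : S.Nodup := (List.nodup_cons.mp hS).2
    simp only [List.map_cons, List.sum_cons]
    by_cases hxg : x = g
    · subst hxg
      have hz : (S.map (fun v => if p v then (if (x == v) = true then (1 : Int) else 0) else 0)).sum = 0 := by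
        apply List.sum_eq_zero
        intro y hy
        rcases List.mem_map.mp hy with ⟨v, hv, rfl⟩
        have : x ≠ v := fun h => hg (h ▸ hv)
        simp [this]
      rw [hz]
      simp
    · have hx' : x ∈ S := by
        rcases List.mem_cons.mp hx with h | h
        · exact absurd h hxg
        · exact h
      rw [ihS hS' hx']
      have : (x == g) = false := by simp [hxg]
      simp [this]

-- counting by predicate = summing counts of the distinct values that satisfy it
theorem pv_sum_count (p : Int → Bool) (L S : List Int) (hS : S.Nodup)
    (hsub : ∀ x ∈ L, x ∈ S) :
    (S.map (fun v => if p v then (L.count v : Int) else 0)).sum = (L.countP p : Int) := by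
  induction L with
  | nil => simp
  | cons x L ih =>
    have hx : x ∈ S := hsub x List.mem_cons_self
    have hsub' : ∀ y ∈ L, y ∈ S := fun y hy => hsub y (List.mem_cons_of_mem _ hy)
    have hstep : ∀ v : Int, (if p v then ((x :: L).count v : Int) else 0)
        = (if p v then (L.count v : Int) else 0)
          + (if p v then (if (x == v) = true then (1 : Int) else 0) else 0) := by
      intro v
      rw [List.count_cons]
      by_cases hpv : p v <;> simp [hpv]
    simp only [hstep]
    rw [List.sum_map_add, ih hsub', pv_sum_ite2 p x S hS hx, List.countP_cons]
    by_cases hpx : p x <;> simp [hpx]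

-- step functions equal on members give equal folds
theorem pv_foldl_ext {α β : Type} (l : List α) (f g : β → α → β)
    (h : ∀ acc, ∀ x ∈ l, f acc x = g acc x) (init : β) :
    l.foldl f init = l.foldl g init := by
  induction l generalizing init with
  | nil => rfl
  | cons x l ih =>
    simp only [List.foldl_cons]
    rw [h init x (List.mem_cons_self)]
    exact ih (fun acc y hy => h acc y (List.mem_cons_of_mem _ hy)) _

-- A's score equals B's score at every position / candidate byte
theorem pv_scores_eq (stream1 : List Int) (k_size pos b : Int) :
    product_score_for_byte pos b stream1 k_size
      = ((((PySem.List.pyRange pos (stream1.length : Int) k_size).foldl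
            (fun d i => d.modify (PySem.List.pyGetD stream1 i 0) 0 (· + 1))
            PySem.Dict.empty : PySem.Dict Int Int)).keys).foldl
          (fun s v =>
            if PySem.Int.bxor b v ∈ pvGood then
              s + ((PySem.List.pyRange pos (stream1.length : Int) k_size).foldl
                    (fun d i => d.modify (PySem.List.pyGetD stream1 i 0) 0 (· + 1))
                    PySem.Dict.empty).getD v 0
            else s)
          0 := by
  set R := PySem.List.pyRange pos (stream1.length : Int) k_size with hR
  set L := R.map (fun i => PySem.List.pyGetD stream1 i 0) with hL
  have hcnt : (R.foldl (fun d i => d.modify (PySem.List.pyGetD stream1 i 0) 0 (· + 1))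
      PySem.Dict.empty) = PySem.Dict.counter L := by
    have h9 : ((R.map (fun i => PySem.List.pyGetD stream1 i 0)).foldl
        (fun d x => d.modify x 0 (· + 1)) (PySem.Dict.empty : PySem.Dict Int Int))
        = R.foldl (fun d i => d.modify (PySem.List.pyGetD stream1 i 0) 0 (· + 1))
          PySem.Dict.empty := List.foldl_map
    rw [PySem.Dict.counter_eq_foldl, hL]
    exact h9.symm
  refine Eq.trans ?_ (congrArg (fun d : PySem.Dict Int Int =>
    (d.keys).foldl (fun s v => if PySem.Int.bxor b v ∈ pvGood then s + d.getD v 0 else s) 0)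
    hcnt).symm
  -- B side: fold over distinct values, pushed into a sum
  have hB : (PySem.Dict.counter L).keys.foldl
      (fun s v => if PySem.Int.bxor b v ∈ pvGood then s + (PySem.Dict.counter L).getD v 0 else s) 0
      = ((PySem.Dict.counter L).keys.map
          (fun v => if PySem.Int.bxor b v ∈ pvGood then ((L.count v : Nat) : Int) else 0)).sum := by
    have hext : (PySem.Dict.counter L).keys.foldl
        (fun s v => if PySem.Int.bxor b v ∈ pvGood then s + (PySem.Dict.counter L).getD v 0 else s) 0
        = (PySem.Dict.counter L).keys.foldl
          (fun s v => s + (if PySem.Int.bxor b v ∈ pvGood then ((L.count v : Nat) : Int) else 0)) 0 := by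
      apply pv_foldl_ext
      intro s v _
      rw [PySem.Dict.getD_counter]
      by_cases h : PySem.Int.bxor b v ∈ pvGood <;> simp [h]
    rw [hext, PySem.List.foldl_add, zero_add]
  -- A side: the running count is a countP over the slice values
  have hA : product_score_for_byte pos b stream1 k_size
      = (L.countP (fun v => decide (PySem.Int.bxor b v ∈ pvGood)) : Int) := by
    unfold product_score_for_byte
    rw [← hR]
    rw [PySem.List.foldl_ite_add_one
      (p := fun i => (65 ≤ PySem.Int.bxor b (PySem.List.pyGetD stream1 i 0) ∧
                      PySem.Int.bxor b (PySem.List.pyGetD stream1 i 0) ≤ 90) ∨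
                     (95 ≤ PySem.Int.bxor b (PySem.List.pyGetD stream1 i 0) ∧
                      PySem.Int.bxor b (PySem.List.pyGetD stream1 i 0) ≤ 122) ∨
                     PySem.Int.bxor b (PySem.List.pyGetD stream1 i 0) = 32)]
    rw [zero_add, hL, List.countP_map]
    refine congrArg Nat.cast (List.countP_congr ?_)
    intro i _
    simp [pv_mem_good]
  have hsum := pv_sum_count (fun v => decide (PySem.Int.bxor b v ∈ pvGood)) L
    (PySem.Set.ofList L) (PySem.Set.nodup_ofList L)
    (fun x hx => (PySem.Set.mem_ofList L x).mpr hx)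
  have hkeys : ((PySem.Dict.counter L).keys.map
        (fun v => if PySem.Int.bxor b v ∈ pvGood then ((L.count v : Nat) : Int) else 0)).sum
      = ((PySem.Set.ofList L).map
        (fun v => if PySem.Int.bxor b v ∈ pvGood then ((L.count v : Nat) : Int) else 0)).sum := by
    rw [PySem.Dict.keys_counter]
  have hsum' : ((PySem.Set.ofList L).map
      (fun v => if PySem.Int.bxor b v ∈ pvGood then ((L.count v : Nat) : Int) else 0)).sum
      = (L.countP (fun v => decide (PySem.Int.bxor b v ∈ pvGood)) : Int) := by
    have hite : ∀ v : Int, (if decide (PySem.Int.bxor b v ∈ pvGood) = true then ((L.count v : Nat) : Int) else 0)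
        = (if PySem.Int.bxor b v ∈ pvGood then ((L.count v : Nat) : Int) else 0) := by
      intro v
      by_cases h : PySem.Int.bxor b v ∈ pvGood <;> simp [h]
    rw [← hsum]
    simp only [hite]
  exact hA.trans (hsum'.symm.trans (hkeys.symm.trans hB.symm))

-- first-argmax over bytes 0..255: Python max(..., key) = B's strict-improvement fold
theorem pv_argmax_eq (s : Int → Int) (hs : 0 ≤ s 0) :
    (match PySem.List.max?
        ((PySem.List.pyRange 0 256).foldl (fun acc b => acc ++ [(b, s b)]) [])
        (fun x => x.2) with
     | some max_value => some max_value.1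
     | none => none)
      = some ((PySem.List.pyRange 0 256).foldl
          (fun st b => if st.2 < s b then (b, s b) else st) ((0 : Int), (-1 : Int))).1 := by
  have hmap : (PySem.List.pyRange 0 256).foldl (fun acc b => acc ++ [(b, s b)]) []
      = (PySem.List.pyRange 0 256).map (fun b => (b, s b)) := by
    have h : ∀ (l : List Int) (init : List (Int × Int)),
        l.foldl (fun acc b => acc ++ [(b, s b)]) init = init ++ l.map (fun b => (b, s b)) := by
      intro l
      induction l with
      | nil => simp
      | cons x l ih => intro init; simp [ih]
    simpa using h (PySem.List.pyRange 0 256) []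
  rw [hmap, PySem.List.pyRange_one_cons (by norm_num : (0 : Int) < 256)]
  unfold PySem.List.max?
  simp only [List.map_cons, List.foldl_cons, List.foldl_map]
  rw [if_pos (by omega : (-1 : Int) < s 0)]
  generalize (PySem.List.pyRange (0 + 1) 256) = l
  generalize ((0:Int), s 0) = m
  induction l generalizing m with
  | nil => rfl
  | cons b l ih =>
    simp only [List.foldl_cons]
    by_cases h : m.2 < s b
    · simp only [if_pos h]
      exact ih _
    · simp only [if_neg h]
      exact ih _

-- the pair fold only depends on the score function on members
theorem pv_fold_congr (s s' : Int → Int) (l : List Int)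
    (h : ∀ b ∈ l, s b = s' b) (m : Int × Int) :
    l.foldl (fun st b => if st.2 < s b then (b, s b) else st) m
      = l.foldl (fun st b => if st.2 < s' b then (b, s' b) else st) m := by
  induction l generalizing m with
  | nil => rfl
  | cons b l ih =>
    simp only [List.foldl_cons]
    rw [h b (List.mem_cons_self), ih (fun x hx => h x (List.mem_cons_of_mem _ hx))]

-- a fold that never improves stays put
theorem pv_fold_stay (l : List Int) (m : Int × Int) (hm : ¬ m.2 < 0) :
    l.foldl (fun st b => if st.2 < (0 : Int) then (b, (0 : Int)) else st) m = m := by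
  induction l with
  | nil => rfl
  | cons b l ih =>
    simp only [List.foldl_cons, if_neg hm]
    exact ih

-- per key position with data, A's chosen byte equals B's chosen byte
theorem pv_pick_eq (stream1 : List Int) (k_size pos : Int) :
    (match PySem.List.max?
        ((PySem.List.pyRange 0 256).foldl
          (fun acc b => acc ++ [(b, product_score_for_byte pos b stream1 k_size)]) [])
        (fun x => x.2) with
     | some max_value => some max_value.1
     | none => none)
      = some ((PySem.List.pyRange 0 256).foldl
          (fun st b =>
            let s : Int := ((((PySem.List.pyRange pos (stream1.length : Int) k_size).foldl
                (fun d i => d.modify (PySem.List.pyGetD stream1 i 0) 0 (· + 1))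
                PySem.Dict.empty : PySem.Dict Int Int)).keys).foldl
              (fun s v =>
                if PySem.Int.bxor b v ∈ pvGood then
                  s + ((PySem.List.pyRange pos (stream1.length : Int) k_size).foldl
                        (fun d i => d.modify (PySem.List.pyGetD stream1 i 0) 0 (· + 1))
                        PySem.Dict.empty).getD v 0
                else s)
              0
            if st.2 < s then (b, s) else st)
          ((0 : Int), (-1 : Int))).1 := by
  have hs0 : 0 ≤ product_score_for_byte pos 0 stream1 k_size := by
    unfold product_score_for_byte
    rw [PySem.List.foldl_ite_add_one
      (p := fun i => (65 ≤ PySem.Int.bxor 0 (PySem.List.pyGetD stream1 i 0) ∧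
                      PySem.Int.bxor 0 (PySem.List.pyGetD stream1 i 0) ≤ 90) ∨
                     (95 ≤ PySem.Int.bxor 0 (PySem.List.pyGetD stream1 i 0) ∧
                      PySem.Int.bxor 0 (PySem.List.pyGetD stream1 i 0) ≤ 122) ∨
                     PySem.Int.bxor 0 (PySem.List.pyGetD stream1 i 0) = 32)]
    omega
  refine (pv_argmax_eq (fun b => product_score_for_byte pos b stream1 k_size) hs0).trans ?_
  exact congrArg (fun p => some p.1)
    (pv_fold_congr (fun b => product_score_for_byte pos b stream1 k_size) _ _
      (fun b _ => pv_scores_eq stream1 k_size pos b) ((0 : Int), (-1 : Int)))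

-- per key position past the end of the stream, A picks byte 0
theorem pv_pick_zero (stream1 : List Int) (k_size pos : Int)
    (hk : 0 < k_size) (hn : (stream1.length : Int) ≤ pos) :
    (match PySem.List.max?
        ((PySem.List.pyRange 0 256).foldl
          (fun acc b => acc ++ [(b, product_score_for_byte pos b stream1 k_size)]) [])
        (fun x => x.2) with
     | some max_value => some max_value.1
     | none => none)
      = some 0 := by
  have hR : PySem.List.pyRange pos (stream1.length : Int) k_size = [] := by
    rw [PySem.List.pyRange_of_pos _ _ hk, if_neg (by omega : ¬ pos < (stream1.length : Int))]
    rfl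
  have hs : ∀ b : Int, product_score_for_byte pos b stream1 k_size = 0 := by
    intro b
    unfold product_score_for_byte
    rw [hR]
    rfl
  rw [pv_argmax_eq (fun b => product_score_for_byte pos b stream1 k_size) (by simp [hs])]
  congr 1
  rw [pv_fold_congr (fun b => product_score_for_byte pos b stream1 k_size) (fun _ => 0)
      _ (fun b _ => hs b) ((0 : Int), (-1 : Int))]
  rw [PySem.List.pyRange_one_cons (by norm_num : (0 : Int) < 256)]
  simp only [List.foldl_cons]
  rw [if_pos (by norm_num : (-1 : Int) < 0)]
  rw [pv_fold_stay _ _ (by norm_num : ¬ (0 : Int) < 0)]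

-- ===== VERDICT (by name: the statement is the Claim_ definition above) =====
theorem attack_xor2_spec : Claim_equal_attack_xor2 := by
  intro stream1 k_size _
  unfold Spec_attack_xor2 attack_xor2 attack_xor2_alt
  apply pv_foldl_ext
  intro acc pos hpos
  have hpos' := PySem.List.mem_pyRange_one.mp hpos
  simp only []
  by_cases hn : (stream1.length : Int) ≤ pos
  · rw [if_pos hn]
    have h := pv_pick_zero stream1 k_size pos (by omega) hn
    split at h
    · simp only [Option.some.injEq] at h
      rw [h]
    · exact absurd h (by simp)
  · rw [if_neg hn]
    have h := pv_pick_eq stream1 k_size pos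
    split at h
    · simp only [Option.some.injEq] at h
      rw [h]
    · exact absurd h (by simp)
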